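-- pv_equiv track=rewrite | github.com/Mherberts/BlackJack | auxiliares.py | somaban
-- ===== SOURCE A (Python) =====
-- def somaban(cartas_banca):
--
--     nj=cartas_banca.count('J')
--     nq=cartas_banca.count('Q')
--     na=cartas_banca.count('A')
--     nk=cartas_banca.count('K')
--
--     somabanca = nj*10 + nq*10 + na*11 + nk*10
--
--
--     for carta in cartas_banca:
--         # ...verifique se ela NÃO é uma figura ou Ás
--         if carta not in ['J', 'Q', 'K', 'A']:
--             # Se não for, é um número. Converta e some.
--             somabanca += int(carta)
--     return(somabanca)
-- ===== SOURCE B (Python) =====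
-- def somaban(cartas_banca):
--     values = {'J': 10, 'Q': 10, 'K': 10, 'A': 11}
--     total = 0
--     for carta in cartas_banca:
--         total += values[carta] if carta in values else int(carta)
--     return total
-- ===== Notes on version B (the rewrite author's own statement) =====
-- stated objective: simpler
-- what changed: Replaces A's four separate .count() scans plus a fifth summing loop with one single pass over the hand that adds each card's value (dict lookup for faces, int() otherwise) to a running total.
import Mathlib
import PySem

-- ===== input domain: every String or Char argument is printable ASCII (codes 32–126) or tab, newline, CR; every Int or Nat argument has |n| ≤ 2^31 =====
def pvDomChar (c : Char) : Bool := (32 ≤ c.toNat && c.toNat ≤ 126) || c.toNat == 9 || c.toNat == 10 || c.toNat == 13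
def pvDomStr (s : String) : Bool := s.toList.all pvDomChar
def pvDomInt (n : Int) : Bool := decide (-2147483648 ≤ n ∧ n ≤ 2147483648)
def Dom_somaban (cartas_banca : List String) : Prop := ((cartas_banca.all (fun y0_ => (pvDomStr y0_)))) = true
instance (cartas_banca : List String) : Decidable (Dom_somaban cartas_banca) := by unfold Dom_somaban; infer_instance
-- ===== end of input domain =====

-- B is a single pass with a running total instead of A's four .count() scans plus a summing loop.

-- ===== PORT A =====
-- int(carta) is PySem.Int.ofStr?; where it is none Python raises ValueError (excluded by Pre_),
-- the port adds getD 0 there.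
def somaban (cartas_banca : List String) : Int :=
  let nj : Int := PySem.List.count cartas_banca "J"
  let nq : Int := PySem.List.count cartas_banca "Q"
  let na : Int := PySem.List.count cartas_banca "A"
  let nk : Int := PySem.List.count cartas_banca "K"
  let somabanca : Int := nj * 10 + nq * 10 + na * 11 + nk * 10
  cartas_banca.foldl
    (fun acc carta =>
      if carta ∉ (["J", "Q", "K", "A"] : List String) then
        acc + (PySem.Int.ofStr? carta).getD 0
      else acc)
    somabanca

-- ===== PORT B =====
def somaban_alt (cartas_banca : List String) : Int :=
  let values : PySem.Dict String Int :=
    PySem.Dict.ofList [("J", 10), ("Q", 10), ("K", 10), ("A", 11)]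
  cartas_banca.foldl
    (fun total carta =>
      total + (match values.get? carta with
               | some v => v
               | none => (PySem.Int.ofStr? carta).getD 0))
    0

-- ===== PRECONDITION & SPEC =====
-- Pre_ excludes exactly the inputs on which A's int(carta) raises ValueError (and B raises the same).
def Pre_somaban (cartas_banca : List String) : Prop :=
  ∀ carta ∈ cartas_banca,
    carta ∈ (["J", "Q", "K", "A"] : List String) ∨ (PySem.Int.ofStr? carta).isSome = true
instance (cartas_banca : List String) : Decidable (Pre_somaban cartas_banca) := by
  unfold Pre_somaban; infer_instance
def pvWitness_somaban : List String := ["A", "7", "K", "10"]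
def Spec_somaban (cartas_banca : List String) (out : Int) : Prop := out = somaban_alt cartas_banca
instance (cartas_banca : List String) (out : Int) : Decidable (Spec_somaban cartas_banca out) := by unfold Spec_somaban; infer_instance

-- ===== CLAIM (what is proved, stated in full; the proofs are below) =====
def Claim_equal_somaban : Prop := ∀ (cartas_banca : List String), Dom_somaban cartas_banca → Pre_somaban cartas_banca → Spec_somaban cartas_banca (somaban cartas_banca)

-- ===== LEMMAS AND PROOFS =====

-- per-card value, shared characterisation of both ports
def cardVal (c : String) : Int :=
  if c ∈ (["J", "Q", "K", "A"] : List String) then (if c = "A" then 11 else 10)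
  else (PySem.Int.ofStr? c).getD 0

lemma foldl_ite_add (p : String → Prop) [DecidablePred p] (g : String → Int)
    (l : List String) (a : Int) :
    l.foldl (fun acc x => if p x then acc + g x else acc) a
      = a + (l.map (fun x => if p x then g x else 0)).sum := by
  induction l generalizing a with
  | nil => simp
  | cons x l ih =>
    by_cases h : p x <;> simp [h, ih] <;> ring

lemma somaban_eq (cs : List String) : somaban cs = (cs.map cardVal).sum := by
  induction cs with
  | nil => rfl
  | cons c cs ih =>
    simp only [somaban, foldl_ite_add] at ih ⊢
    simp only [PySem.List.count, List.count_cons, List.map_cons, List.sum_cons]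
    by_cases hJ : c = "J" <;> by_cases hQ : c = "Q" <;> by_cases hK : c = "K" <;>
      by_cases hA : c = "A" <;>
        simp_all [cardVal, hJ, hQ, hK, hA] <;> push_cast <;> ring_nf <;> omega

lemma get?_values (c : String) :
    (PySem.Dict.ofList [("J", (10:Int)), ("Q", 10), ("K", 10), ("A", 11)]).get? c =
      if c = "J" then some 10 else if c = "Q" then some 10 else if c = "K" then some 10
      else if c = "A" then some 11 else none := by
  have e : ∀ a b : String, (a == b) = decide (b = a) := by
    intro a b
    by_cases h : a = b <;> simp [h, eq_comm (a := b)]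
  have hv : PySem.Dict.ofList [("J", (10:Int)), ("Q", 10), ("K", 10), ("A", 11)] =
      PySem.Dict.mk [("J", 10), ("Q", 10), ("K", 10), ("A", 11)] := by rfl
  simp only [hv, e, PySem.Dict.get?, List.find?]
  split_ifs <;> simp_all

lemma somaban_alt_eq (cs : List String) : somaban_alt cs = (cs.map cardVal).sum := by
  simp only [somaban_alt]
  rw [PySem.List.foldl_add]
  simp only [zero_add]
  congr 1
  apply List.map_congr_left
  intro c _
  simp only [cardVal, get?_values]
  by_cases hJ : c = "J" <;> by_cases hQ : c = "Q" <;> by_cases hK : c = "K" <;>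
    by_cases hA : c = "A" <;> simp_all

-- ===== VERDICT (by name: the statement is the Claim_ definition above) =====
theorem somaban_spec : Claim_equal_somaban := by
  intro cs _ _
  unfold Spec_somaban
  rw [somaban_eq, somaban_alt_eq]
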